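-- pv_equiv track=rewrite | github.com/XiaotongShen/Data-Structure-and-Algorithm | Zuo/Basic/Class14/Code01_Light.py | min_light2
-- ===== SOURCE A (Python) =====
-- def min_light2(road):
--     road_list = list(road)
--     i = 0
--     light = 0
--     while i < len(road_list):
--         if road_list[i] == 'X':
--             i += 1
--         else:
--             light += 1
--             if i + 1 == len(road_list):
--                 break
--             else:
--                 if road_list[i + 1] == 'X':
--                     i += 2
--                 else:
--                     i += 3
--     return light
-- ===== SOURCE B (Python) =====
-- def min_light2(road):
--     return sum((len(seg) + 2) // 3 for seg in road.split('X'))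
-- ===== Notes on version B (the rewrite author's own statement) =====
-- stated objective: faster
-- what changed: Replaces the pointer-walking greedy while-loop over a list copy with splitting the road on the blocked character and summing the closed-form (len(segment)+2)//3 per maximal uncovered run.
import Mathlib
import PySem

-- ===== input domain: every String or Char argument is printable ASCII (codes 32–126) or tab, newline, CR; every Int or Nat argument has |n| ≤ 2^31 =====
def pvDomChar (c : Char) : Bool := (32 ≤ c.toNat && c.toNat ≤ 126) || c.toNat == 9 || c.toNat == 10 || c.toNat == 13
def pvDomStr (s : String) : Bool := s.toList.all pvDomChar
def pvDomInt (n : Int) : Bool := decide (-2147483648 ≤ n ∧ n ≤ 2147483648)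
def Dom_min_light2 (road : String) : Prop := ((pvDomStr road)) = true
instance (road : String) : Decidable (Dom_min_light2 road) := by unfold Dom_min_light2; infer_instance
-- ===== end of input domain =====

-- B replaces A's pointer-walking greedy loop by splitting the road on 'X' and summing (len+2)//3 per segment (measured faster in a timing run).

-- ===== PORT A =====
-- the while-loop: i steps by 1 past an 'X', else places a light and steps by 2 or 3
def minLight2Go (rl : List Char) (i : Nat) (light : Int) : Int :=
  if h : i < rl.length then
    if rl[i] = 'X' then
      minLight2Go rl (i + 1) light
    else
      if i + 1 = rl.length then light + 1
      else
        if hx : i + 1 < rl.length then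
          if rl[i + 1] = 'X' then minLight2Go rl (i + 2) (light + 1)
          else minLight2Go rl (i + 3) (light + 1)
        else light + 1   -- unreachable: i+1 ≤ length and i+1 ≠ length
  else light
termination_by rl.length - i

def min_light2 (road : String) : Int :=
  minLight2Go road.toList 0 0

-- ===== PORT B =====
def min_light2_alt (road : String) : Int :=
  ((PySem.Str.split? road "X").getD []).foldl
    (fun acc seg => acc + PySem.Int.floordiv (PySem.Str.len seg + 2) 3) 0

-- ===== PRECONDITION & SPEC =====
def Spec_min_light2 (road : String) (out : Int) : Prop := out = min_light2_alt road
instance (road : String) (out : Int) : Decidable (Spec_min_light2 road out) := by unfold Spec_min_light2; infer_instance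

-- ===== CLAIM (what is proved, stated in full; the proofs are below) =====
def Claim_equal_min_light2 : Prop := ∀ (road : String), Dom_min_light2 road → Spec_min_light2 road (min_light2 road)

-- ===== LEMMAS AND PROOFS =====

-- structural restatement of A's loop on the remaining suffix
def skipA : List Char → List Char
  | [] => []
  | e :: r2 => if e = 'X' then r2 else r2.drop 1

theorem skipA_length_le (r : List Char) : (skipA r).length ≤ r.length := by
  cases r with
  | nil => simp [skipA]
  | cons e r2 =>
      simp only [skipA]
      split
      · simp
      · simp only [List.length_drop, List.length_cons]
        omega

def fA : List Char → Int
  | [] => 0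
  | d :: r =>
      if d = 'X' then fA r
      else 1 + fA (skipA r)
termination_by l => l.length
decreasing_by
  · simp only [List.length_cons]
    omega
  · have := skipA_length_le r
    simp only [List.length_cons]
    omega

-- single-character split, structurally
def splitC (c : Char) : List Char → List (List Char)
  | [] => [[]]
  | d :: r =>
      if d = c then [] :: splitC c r
      else
        match splitC c r with
        | [] => [[d]]
        | s :: ss => (d :: s) :: ss

theorem splitC_ne_nil (c : Char) (l : List Char) : splitC c l ≠ [] := by
  cases l with
  | nil => simp [splitC]
  | cons d r =>
      simp only [splitC]
      split
      · simp
      · split <;> simp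

-- per-segment cost and the total
def segCost (s : List Char) : Int := PySem.Int.floordiv ((s.length : Int) + 2) 3

def sumSeg (segs : List (List Char)) : Int := (segs.map segCost).sum

theorem segCost_eq (s : List Char) : segCost s = (((s.length + 2) / 3 : Nat) : Int) := by
  simp only [segCost, PySem.Int.floordiv]
  rw [show ((s.length : Int) + 2) = ((s.length + 2 : Nat) : Int) by push_cast; ring]
  rw [Int.fdiv_eq_ediv]
  norm_num

-- A's structural loop equals the per-segment sum
theorem fA_eq_sumSeg (l : List Char) : fA l = sumSeg (splitC 'X' l) := by
  generalize hn : l.length = n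
  induction n using Nat.strong_induction_on generalizing l with
  | _ n ih =>
    cases l with
    | nil => simp [fA, splitC, sumSeg, segCost_eq]
    | cons d r =>
      by_cases hd : d = 'X'
      · subst hd
        have := ih r.length (by simp at hn; omega) r rfl
        simp [fA, splitC, sumSeg, this, segCost_eq]
      · cases r with
        | nil =>
            simp [fA, hd, skipA, splitC, sumSeg, segCost_eq]
        | cons e r2 =>
          by_cases he : e = 'X'
          · subst he
            have hih := ih r2.length (by simp at hn; omega) r2 rfl
            simp [fA, hd, skipA, splitC, sumSeg, hih, segCost_eq]
          · cases r2 with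
            | nil =>
                simp [fA, hd, he, skipA, splitC, sumSeg, segCost_eq]
            | cons g r3 =>
              have hr3 := ih r3.length (by simp at hn; omega) r3 rfl
              obtain ⟨u, us, hu⟩ : ∃ u us, splitC 'X' r3 = u :: us := by
                cases h : splitC 'X' r3 with
                | nil => exact absurd h (splitC_ne_nil _ _)
                | cons u us => exact ⟨u, us, rfl⟩
              simp only [fA, if_neg hd, skipA, if_neg he, List.drop_succ_cons,
                List.drop_zero]
              rw [hr3]
              by_cases hg : g = 'X'
              · subst hg
                simp only [splitC, if_neg hd, if_neg he, ite_true, hu]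
                simp [sumSeg, segCost_eq]
              · simp only [splitC, if_neg hd, if_neg he, if_neg hg, hu]
                simp only [sumSeg, List.map_cons, List.sum_cons, segCost_eq,
                  List.length_cons]
                have h5 : (u.length + 1 + 1 + 1 + 2) / 3 = (u.length + 2) / 3 + 1 := by
                  omega
                rw [h5]
                push_cast
                ring

-- the index loop equals the structural loop on the dropped suffix
theorem minLight2Go_eq (rl : List Char) (i : Nat) (light : Int) :
    minLight2Go rl i light = light + fA (rl.drop i) := by
  generalize hk : rl.length - i = k
  induction k using Nat.strong_induction_on generalizing i light with
  | _ k ih =>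
    rw [minLight2Go]
    split
    · rename_i h
      have hdrop : rl.drop i = rl[i] :: rl.drop (i + 1) := List.drop_eq_getElem_cons h
      by_cases hx : rl[i] = 'X'
      · rw [if_pos hx, ih (rl.length - (i+1)) (by omega) (i+1) light rfl, hdrop, hx]
        simp [fA]
      · rw [if_neg hx]
        by_cases hlast : i + 1 = rl.length
        · rw [if_pos hlast, hdrop]
          have : rl.drop (i+1) = [] := List.drop_eq_nil_of_le (by omega)
          simp [fA, hx, this, skipA]
        · rw [if_neg hlast]
          have h1 : i + 1 < rl.length := by omega
          rw [dif_pos h1]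
          have hdrop1 : rl.drop (i+1) = rl[i+1] :: rl.drop (i + 2) := List.drop_eq_getElem_cons h1
          by_cases hx1 : rl[i+1] = 'X'
          · rw [if_pos hx1, ih (rl.length - (i+2)) (by omega) (i+2) (light+1) rfl]
            rw [hdrop, hdrop1, hx1]
            simp only [fA, if_neg hx, skipA, ite_true]
            omega
          · rw [if_neg hx1, ih (rl.length - (i+3)) (by omega) (i+3) (light+1) rfl]
            rw [hdrop, hdrop1]
            simp only [fA, if_neg hx, skipA, if_neg hx1]
            have : (rl.drop (i+2)).drop 1 = rl.drop (i+3) := by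
              rw [List.drop_drop]
            rw [this]
            omega
    · have : rl.drop i = [] := List.drop_eq_nil_of_le (by omega)
      simp [this, fA]

-- PySem's splitOn on a one-character separator is splitC
theorem splitOn_go_eq (c : Char) (fuel : Nat) (l cur : List Char) (acc : List (List Char))
    (hf : l.length ≤ fuel) :
    PySem.Chars.splitOn.go [c] fuel l cur acc =
      acc.reverse ++ (match splitC c l with
        | [] => [cur.reverse]
        | s :: ss => (cur.reverse ++ s) :: ss) := by
  induction fuel generalizing l cur acc with
  | zero =>
      have : l = [] := List.eq_nil_of_length_eq_zero (by omega)
      subst this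
      simp [PySem.Chars.splitOn.go, splitC]
  | succ f ihf =>
      cases l with
      | nil => simp [PySem.Chars.splitOn.go, splitC]
      | cons d r =>
          simp only [PySem.Chars.splitOn.go]
          by_cases hd : d = c
          · subst hd
            have hpre : [d].isPrefixOf (d :: r) = true := by simp [List.isPrefixOf]
            rw [if_pos hpre]
            simp only [List.length_cons] at hf
            rw [ihf _ _ _ (by simpa using Nat.le_of_succ_le_succ hf)]
            simp only [splitC, ite_true]
            cases h : splitC d r with
            | nil => exact absurd h (splitC_ne_nil _ _)
            | cons s ss => simp [h]
          · have hpre : [c].isPrefixOf (d :: r) = false := by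
              simp [List.isPrefixOf]
              exact fun h => hd h.symm
            rw [if_neg (by simp [hpre])]
            simp only [List.length_cons] at hf
            rw [ihf _ _ _ (Nat.le_of_succ_le_succ hf)]
            simp only [splitC, if_neg hd]
            cases h : splitC c r with
            | nil => exact absurd h (splitC_ne_nil _ _)
            | cons s ss => simp

theorem splitOn_singleton (c : Char) (l : List Char) :
    PySem.Chars.splitOn l [c] = splitC c l := by
  rw [PySem.Chars.splitOn, splitOn_go_eq c (l.length + 1) l [] [] (by omega)]
  cases h : splitC c l with
  | nil => exact absurd h (splitC_ne_nil _ _)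
  | cons s ss => simp

theorem foldl_add_segCost (g : List Char → Int) (segs : List (List Char)) (a : Int) :
    segs.foldl (fun acc s => acc + g s) a = a + (segs.map g).sum := by
  induction segs generalizing a with
  | nil => simp
  | cons s ss ih => simp [ih, add_assoc]

-- ===== VERDICT (by name: the statement is the Claim_ definition above) =====
theorem min_light2_spec : Claim_equal_min_light2 := by
  intro road _
  show min_light2 road = min_light2_alt road
  rw [min_light2, minLight2Go_eq]
  simp only [List.drop_zero, zero_add, fA_eq_sumSeg]
  rw [min_light2_alt]
  have hs : PySem.Chars.split? road.toList "X".toList = some (splitC 'X' road.toList) := by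
    rw [show ("X".toList) = ['X'] from rfl, PySem.Chars.split?, if_neg (by simp),
      splitOn_singleton]
  rw [PySem.Str.split?, hs, Option.map_some, Option.getD_some, List.foldl_map,
    foldl_add_segCost, zero_add]
  unfold sumSeg
  congr 1
  apply List.map_congr_left
  intro s _
  simp [segCost, PySem.Str.len]
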